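-- pv_equiv track=rewrite | github.com/Hiron2305/ege_info_tutor | homework/100325/9.py | check
-- ===== SOURCE A (Python) =====
-- def check(row):
--     val_unique = 0
--     sum_unique = 0
--     sum_repeated = 0
--
--     for i in row:
--         if row.count(i) == 1:
--             val_unique += 1
--             sum_unique += i
--         else:
--             sum_repeated += i
--
--     if val_unique == 3:
--         if sum_repeated ** 2 > sum_unique ** 2:
--             return True
--
--     return False
-- ===== SOURCE B (Python) =====
-- def check(row):
--     counts = {}
--     for i in row:
--         counts[i] = counts.get(i, 0) + 1
--
--     val_unique = 0
--     sum_unique = 0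
--     sum_repeated = 0
--     for v, c in counts.items():
--         if c == 1:
--             val_unique += 1
--             sum_unique += v
--         else:
--             sum_repeated += v * c
--
--     return val_unique == 3 and sum_repeated ** 2 > sum_unique ** 2
-- ===== Notes on version B (the rewrite author's own statement) =====
-- stated objective: faster
-- what changed: Builds a frequency dict in one pass and then iterates over the distinct (value, count) pairs, adding value*count for repeated values, instead of calling row.count(i) inside the loop for every element.
import Mathlib
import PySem

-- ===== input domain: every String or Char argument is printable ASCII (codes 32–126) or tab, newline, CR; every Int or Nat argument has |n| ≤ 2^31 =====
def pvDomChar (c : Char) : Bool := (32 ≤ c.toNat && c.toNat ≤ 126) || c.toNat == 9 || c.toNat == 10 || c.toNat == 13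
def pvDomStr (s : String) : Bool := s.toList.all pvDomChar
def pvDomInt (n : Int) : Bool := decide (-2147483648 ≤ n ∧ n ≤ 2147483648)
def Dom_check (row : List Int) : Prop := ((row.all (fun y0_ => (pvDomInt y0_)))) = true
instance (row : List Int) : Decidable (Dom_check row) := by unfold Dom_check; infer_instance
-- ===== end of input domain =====

-- B replaces the quadratic row.count(i)-inside-the-loop scan by a frequency dict built
-- once and a pass over its distinct (value, count) pairs (objective: faster).

-- ===== PORT A =====
def check (row : List Int) : Bool :=
  let s := row.foldl
    (fun (acc : Int × Int × Int) i =>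
      if PySem.List.count row i == 1 then (acc.1 + 1, acc.2.1 + i, acc.2.2)
      else (acc.1, acc.2.1, acc.2.2 + i))
    (0, 0, 0)
  if s.1 == 3 then
    if s.2.2 ^ 2 > s.2.1 ^ 2 then true else false
  else false

-- ===== PORT B =====
def check_alt (row : List Int) : Bool :=
  let counts := row.foldl
    (fun (d : PySem.Dict Int Int) i => d.insert i (d.getD i 0 + 1)) PySem.Dict.empty
  let s : Int × Int × Int := counts.items.foldl
    (fun (acc : Int × Int × Int) vc =>
      if vc.2 == 1 then (acc.1 + 1, acc.2.1 + vc.1, acc.2.2)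
      else (acc.1, acc.2.1, acc.2.2 + vc.1 * vc.2))
    (0, 0, 0)
  s.1 == 3 && decide (s.2.2 ^ (2 : Nat) > s.2.1 ^ (2 : Nat))

-- ===== PRECONDITION & SPEC =====
def Spec_check (row : List Int) (out : Bool) : Prop := out = check_alt row
instance (row : List Int) (out : Bool) : Decidable (Spec_check row out) := by unfold Spec_check; infer_instance

-- ===== CLAIM (what is proved, stated in full; the proofs are below) =====
def Claim_equal_check : Prop := ∀ (row : List Int), Dom_check row → Spec_check row (check row)

-- ===== LEMMAS AND PROOFS =====

-- A's loop: the three accumulators are sums of pointwise indicator maps over the traversed list.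
theorem foldlA_char (r : List Int) (l : List Int) (a b c : Int) :
    l.foldl
      (fun (acc : Int × Int × Int) i =>
        if PySem.List.count r i == 1 then (acc.1 + 1, acc.2.1 + i, acc.2.2)
        else (acc.1, acc.2.1, acc.2.2 + i))
      (a, b, c)
    = (a + (l.map (fun i => if PySem.List.count r i == 1 then (1 : Int) else 0)).sum,
       b + (l.map (fun i => if PySem.List.count r i == 1 then i else 0)).sum,
       c + (l.map (fun i => if PySem.List.count r i == 1 then (0 : Int) else i)).sum) := by
  induction l generalizing a b c with
  | nil => simp
  | cons x t ih =>
    rw [List.foldl_cons]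
    simp only [List.map_cons, List.sum_cons]
    split <;> rw [ih] <;> simp only [Prod.mk.injEq] <;>
      exact ⟨by ring, by ring, by ring⟩

-- B's loop over (value, count) pairs, same shape.
theorem foldlB_char (l : List (Int × Int)) (a b c : Int) :
    l.foldl
      (fun (acc : Int × Int × Int) vc =>
        if vc.2 == 1 then (acc.1 + 1, acc.2.1 + vc.1, acc.2.2)
        else (acc.1, acc.2.1, acc.2.2 + vc.1 * vc.2))
      (a, b, c)
    = (a + (l.map (fun vc => if vc.2 == 1 then (1 : Int) else 0)).sum,
       b + (l.map (fun vc => if vc.2 == 1 then vc.1 else 0)).sum,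
       c + (l.map (fun vc => if vc.2 == 1 then (0 : Int) else vc.1 * vc.2)).sum) := by
  induction l generalizing a b c with
  | nil => simp
  | cons x t ih =>
    rw [List.foldl_cons]
    simp only [List.map_cons, List.sum_cons]
    split <;> rw [ih] <;> simp only [Prod.mk.injEq] <;>
      exact ⟨by ring, by ring, by ring⟩

-- Grouping: a sum over all elements of r equals the count-weighted sum over any
-- duplicate-free list with the same members.
theorem sum_map_eq_sum_keys (r ks : List Int) (hnd : ks.Nodup)
    (hm : ∀ x, x ∈ ks ↔ x ∈ r) (g : Int → Int) :
    (r.map g).sum = (ks.map (fun k => (r.count k : Int) * g k)).sum := by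
  have hfin : ks.toFinset = r.toFinset := by
    ext x; simp [List.mem_toFinset, hm x]
  have h1 := Finset.sum_multiset_map_count (r : Multiset Int) g
  have h2 := List.sum_toFinset (fun k => (r.count k : Int) * g k) hnd
  simp only [Multiset.map_coe, Multiset.sum_coe, List.toFinset_coe,
    Multiset.coe_count] at h1
  rw [h1, ← hfin, ← h2]
  refine Finset.sum_congr rfl ?_
  intro x _
  rw [nsmul_eq_mul]

theorem check_eq_check_alt (row : List Int) : check row = check_alt row := by
  simp only [check, check_alt, PySem.Dict.foldl_insert_getD_add_one_eq_counter,
    PySem.Dict.items_counter, foldlA_char, foldlB_char, List.map_map]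
  have hnd := PySem.Set.nodup_ofList row
  have hm : ∀ x, x ∈ PySem.Set.ofList row ↔ x ∈ row := PySem.Set.mem_ofList row
  have key : ∀ g h : Int → Int,
      (∀ k, (row.count k : Int) * g k = h k) →
      (row.map (fun i => g i)).sum = ((PySem.Set.ofList row).map h).sum := by
    intro g h hgh
    rw [sum_map_eq_sum_keys row _ hnd hm g]
    exact congrArg List.sum (List.map_congr_left (fun k _ => hgh k))
  have e1 : (row.map (fun i => if PySem.List.count row i == 1 then (1 : Int) else 0)).sum
      = ((PySem.Set.ofList row).map
          (fun k => if ((row.count k : Int) == 1) then (1 : Int) else 0)).sum := by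
    apply key
    intro k
    by_cases hk : row.count k = 1 <;> simp [hk]
  have e2 : (row.map (fun i => if PySem.List.count row i == 1 then i else 0)).sum
      = ((PySem.Set.ofList row).map
          (fun k => if ((row.count k : Int) == 1) then k else 0)).sum := by
    apply key
    intro k
    by_cases hk : row.count k = 1 <;> simp [hk]
  have e3 : (row.map (fun i => if PySem.List.count row i == 1 then (0 : Int) else i)).sum
      = ((PySem.Set.ofList row).map
          (fun k => if ((row.count k : Int) == 1) then (0 : Int) else k * (row.count k : Int))).sum := by
    apply key
    intro k
    by_cases hk : row.count k = 1
    · simp [hk]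
    · simp [hk, mul_comm]
  simp only [Function.comp_def]
  rw [e1, e2, e3]
  split <;> simp_all

-- ===== VERDICT (by name: the statement is the Claim_ definition above) =====
theorem check_spec : Claim_equal_check := by
  intro row _
  exact check_eq_check_alt row
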